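-- pv_equiv track=rewrite | github.com/systragroup/quetzal | quetzal/engine/pathfinder_utils.py | get_first_and_last
-- ===== SOURCE A (Python) =====
-- def get_first_and_last(path, link_dict):
--     s = set()
--
--     for i in path:
--         try:
--             s.add(link_dict[i])
--             break
--         except KeyError:
--             pass
--
--     for i in reversed(path):
--         try:
--             s.add(link_dict[i])
--             break
--         except KeyError:
--             pass
--     return s
-- ===== SOURCE B (Python) =====
-- def get_first_and_last(path, link_dict):
--     present = []
--     for i in path:
--         try:
--             present.append(link_dict[i])
--         except KeyError:
--             pass
--     if present:
--         return {present[0], present[-1]}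
--     return set()
-- ===== Notes on version B (the rewrite author's own statement) =====
-- stated objective: simpler
-- what changed: Replaces A's two early-breaking scans (forward and backward with a set accumulator) by one forward pass collecting all present mapped values, then returning the set of the list's two endpoints.
import Mathlib
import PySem

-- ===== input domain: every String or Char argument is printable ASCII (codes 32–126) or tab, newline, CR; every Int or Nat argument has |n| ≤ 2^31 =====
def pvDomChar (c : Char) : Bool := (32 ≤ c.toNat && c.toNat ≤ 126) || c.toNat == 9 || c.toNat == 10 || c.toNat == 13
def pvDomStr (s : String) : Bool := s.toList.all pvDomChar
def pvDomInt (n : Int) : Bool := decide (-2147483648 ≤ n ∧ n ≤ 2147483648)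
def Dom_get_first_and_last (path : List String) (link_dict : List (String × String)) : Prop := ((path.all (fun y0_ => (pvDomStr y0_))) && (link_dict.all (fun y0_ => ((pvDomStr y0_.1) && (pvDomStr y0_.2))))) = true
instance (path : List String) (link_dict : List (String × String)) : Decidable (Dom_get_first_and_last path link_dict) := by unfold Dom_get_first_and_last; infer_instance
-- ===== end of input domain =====

-- B replaces A's two early-breaking end scans with one full pass plus endpoint selection (simpler decomposition).


-- ===== PORT A =====
-- loop 'for i in path: try: s.add(link_dict[i]); break; except KeyError: pass'
def gflALoop (link_dict : List (String × String)) : List String → PySem.Set String → PySem.Set String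
  | [], s => s
  | i :: rest, s =>
    match PySem.Dict.get? (PySem.Dict.mk link_dict) i with
    | some v => PySem.Set.add s v       -- add and break
    | none => gflALoop link_dict rest s -- KeyError: pass

def get_first_and_last (path : List String) (link_dict : List (String × String)) : List String :=
  let s : PySem.Set String := PySem.Set.empty
  let s := gflALoop link_dict path s
  let s := gflALoop link_dict path.reverse s
  s

-- ===== PORT B =====
-- B: one pass collecting every present mapped value; return {present[0], present[-1]} or set()
def get_first_and_last_alt (path : List String) (link_dict : List (String × String)) : List String :=
  let present := path.filterMap (fun i => PySem.Dict.get? (PySem.Dict.mk link_dict) i)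
  match present with
  | [] => PySem.Set.empty
  | v :: rest =>
    PySem.Set.add (PySem.Set.add PySem.Set.empty v) ((v :: rest).getLast (by simp))

-- ===== PRECONDITION & SPEC =====
def Spec_get_first_and_last (path : List String) (link_dict : List (String × String)) (out : List String) : Prop := out = get_first_and_last_alt path link_dict
instance (path : List String) (link_dict : List (String × String)) (out : List String) : Decidable (Spec_get_first_and_last path link_dict out) := by unfold Spec_get_first_and_last; infer_instance

-- ===== CLAIM (what is proved, stated in full; the proofs are below) =====
def Claim_equal_get_first_and_last : Prop := ∀ (path : List String) (link_dict : List (String × String)), Dom_get_first_and_last path link_dict → Spec_get_first_and_last path link_dict (get_first_and_last path link_dict)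

-- ===== LEMMAS AND PROOFS =====
theorem gflALoop_eq (link_dict : List (String × String)) (path : List String) (s : PySem.Set String) :
    gflALoop link_dict path s =
      match path.filterMap (fun i => PySem.Dict.get? (PySem.Dict.mk link_dict) i) with
      | [] => s
      | v :: _ => PySem.Set.add s v := by
  induction path with
  | nil => rfl
  | cons i rest ih =>
    simp only [gflALoop, List.filterMap_cons]
    cases PySem.Dict.get? (PySem.Dict.mk link_dict) i with
    | none => exact ih
    | some v => rfl

-- ===== VERDICT (by name: the statement is the Claim_ definition above) =====
theorem get_first_and_last_spec : Claim_equal_get_first_and_last := by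
  intro path link_dict _
  unfold Spec_get_first_and_last get_first_and_last get_first_and_last_alt
  simp only [gflALoop_eq, List.filterMap_reverse]
  cases h : path.filterMap (fun i => PySem.Dict.get? (PySem.Dict.mk link_dict) i) with
  | nil => simp
  | cons v rest =>
    cases hr : (v :: rest).reverse with
    | nil => simp at hr
    | cons w tl =>
      have hw : w = (v :: rest).getLast (by simp) := by
        have := List.head_reverse (l := v :: rest) (by simp)
        simpa [hr] using this
      simp [hw]
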